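-- pv_equiv track=rewrite | github.com/JoaoAntonio08/The-Collector-Binarie | v.1.5/ui/binary_interpreter_fixed.py | _tokenize_binary
-- ===== SOURCE A (Python) =====
-- def _tokenize_binary(binary_code):
--     """
--     Divide o código binário em tokens de 8 bits.
--
--     Args:
--         binary_code: Código binário normalizado
--
--     Returns:
--         Lista de tokens
--     """
--     tokens = []
--     current_token = ""
--
--     for char in binary_code:
--         if char in '01':
--             current_token += char
--             if len(current_token) == 8:
--                 tokens.append(current_token)
--                 current_token = ""
--         elif char in ' \n':
--             # Finaliza o token atual se necessário
--             if current_token: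
--                 tokens.append(current_token)
--                 current_token = ""
--
--             # Adiciona quebra de linha como token especial
--             if char == '\n':
--                 tokens.append("00001010")  # \n em binário
--
--     # Adiciona o último token se houver
--     if current_token:
--         tokens.append(current_token)
--
--     return tokens
-- ===== SOURCE B (Python) =====
-- def _tokenize_binary(binary_code):
--     # Run-based scan: strip transparent characters, then walk the remaining
--     # string run by run, slicing each digit run into 8-char chunks.
--     filtered = ''.join(ch for ch in binary_code if ch in '01 \n')
--     tokens = []
--     i, n = 0, len(filtered)
--     while i < n:
--         ch = filtered[i]
--         if ch == '\n':
--             tokens.append("00001010")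
--             i += 1
--         elif ch == ' ':
--             i += 1
--         else:
--             j = i
--             while j < n and filtered[j] in '01':
--                 j += 1
--             run = filtered[i:j]
--             tokens.extend(run[k:k + 8] for k in range(0, len(run), 8))
--             i = j
--     return tokens
-- ===== Notes on version B (the rewrite author's own statement) =====
-- stated objective: alternative
-- what changed: Replaced A's per-character accumulator loop by a filter-then-run-scan decomposition: strip transparent characters once, then walk the string run by run, slicing each digit run into 8-char chunks and mapping newlines to the marker token.
import Mathlib
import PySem

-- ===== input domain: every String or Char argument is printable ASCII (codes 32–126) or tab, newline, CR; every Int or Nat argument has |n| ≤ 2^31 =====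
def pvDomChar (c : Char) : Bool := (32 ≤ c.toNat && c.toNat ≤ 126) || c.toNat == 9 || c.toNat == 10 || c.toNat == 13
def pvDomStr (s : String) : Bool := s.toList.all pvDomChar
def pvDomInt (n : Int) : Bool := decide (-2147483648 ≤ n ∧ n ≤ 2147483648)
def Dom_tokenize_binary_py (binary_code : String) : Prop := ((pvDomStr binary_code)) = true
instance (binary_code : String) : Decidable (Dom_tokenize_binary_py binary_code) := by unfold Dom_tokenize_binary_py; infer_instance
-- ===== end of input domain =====

-- B replaces A's per-character accumulator with a filter-then-run-scan decomposition (alternative, same cost).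

-- ===== PORT A =====
-- current_token is kept as a List Char (appending a char = ++ [c]); tokens as List String.
def pvAStep (s : List String × List Char) (c : Char) : List String × List Char :=
  if c = '0' ∨ c = '1' then
    let cur := s.2 ++ [c]
    if cur.length = 8 then (s.1 ++ [String.mk cur], []) else (s.1, cur)
  else if c = ' ' ∨ c = '\n' then
    let toks := if s.2 ≠ [] then s.1 ++ [String.mk s.2] else s.1
    if c = '\n' then (toks ++ ["00001010"], []) else (toks, [])
  else s

def tokenize_binary_py (binary_code : String) : List String :=
  let st := binary_code.toList.foldl pvAStep ([], [])
  if st.2 ≠ [] then st.1 ++ [String.mk st.2] else st.1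

-- ===== PORT B =====
def pvBit (c : Char) : Bool := c = '0' || c = '1'
def pvKeep (c : Char) : Bool := pvBit c || c = ' ' || c = '\n'

-- run[k:k+8] for k in range(0, len(run), 8)
def pvChunks (l : List Char) : List String :=
  if h : l = [] then []
  else String.mk (l.take 8) :: pvChunks (l.drop 8)
  termination_by l.length
  decreasing_by
    cases l with
    | nil => exact absurd rfl h
    | cons a t => simp

-- the run-by-run scan over the filtered characters (the while loop of Source B)
def pvScan (l : List Char) : List String :=
  match l with
  | [] => []
  | c :: rest =>
    if c = '\n' then "00001010" :: pvScan rest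
    else if c = ' ' then pvScan rest
    else pvChunks (c :: rest.takeWhile pvBit) ++ pvScan (rest.dropWhile pvBit)
  termination_by l.length
  decreasing_by
    · simp
    · simp
    · exact Nat.lt_succ_of_le (List.length_dropWhile_le _ _)

def tokenize_binary_py_alt (binary_code : String) : List String :=
  pvScan (binary_code.toList.filter pvKeep)

-- ===== PRECONDITION & SPEC =====
def Spec_tokenize_binary_py (binary_code : String) (out : List String) : Prop := out = tokenize_binary_py_alt binary_code
instance (binary_code : String) (out : List String) : Decidable (Spec_tokenize_binary_py binary_code out) := by unfold Spec_tokenize_binary_py; infer_instance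

-- ===== CLAIM (what is proved, stated in full; the proofs are below) =====
def Claim_equal_tokenize_binary_py : Prop := ∀ (binary_code : String), Dom_tokenize_binary_py binary_code → Spec_tokenize_binary_py binary_code (tokenize_binary_py binary_code)

-- ===== LEMMAS AND PROOFS =====

-- A's final flush, as a named function (tokenize_binary_py's let body)
def pvFinish (st : List String × List Char) : List String :=
  if st.2 ≠ [] then st.1 ++ [String.mk st.2] else st.1

-- A's step ignores characters outside '01 \n'
theorem pvAStep_skip (s : List String × List Char) (c : Char) (h : pvKeep c = false) :
    pvAStep s c = s := by
  simp [pvKeep, pvBit] at h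
  obtain ⟨⟨⟨h0, h1⟩, h2⟩, h3⟩ := h
  simp [pvAStep, h0, h1, h2, h3]

theorem pvFold_filter (l : List Char) (s : List String × List Char) :
    l.foldl pvAStep s = (l.filter pvKeep).foldl pvAStep s := by
  induction l generalizing s with
  | nil => rfl
  | cons c t ih =>
    by_cases h : pvKeep c = true
    · simp [List.filter_cons, h, List.foldl, ih]
    · simp only [Bool.not_eq_true] at h
      simp [List.filter_cons, h, List.foldl, pvAStep_skip s c h, ih]

theorem pvChunks_full (x y : List Char) (h : x.length = 8) :
    pvChunks (x ++ y) = String.mk x :: pvChunks y := by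
  have hx : x ++ y ≠ [] := by
    intro hc
    rw [List.append_eq_nil_iff] at hc
    rw [hc.1] at h; simp at h
  rw [pvChunks, dif_neg hx, ← h, List.take_left, List.drop_left]

theorem pvChunks_small (x : List Char) (h : x.length < 8) :
    pvChunks x = if x ≠ [] then [String.mk x] else [] := by
  by_cases hx : x = []
  · simp [hx, pvChunks]
  · rw [pvChunks]
    simp [hx, List.take_of_length_le (le_of_lt h), List.drop_eq_nil_of_le (le_of_lt h), pvChunks]

-- pvScan restated through pvChunks on a pending prefix
def pvPend (cur l : List Char) : List String :=
  pvChunks (cur ++ l.takeWhile pvBit) ++ pvScan (l.dropWhile pvBit)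

theorem pvScan_eq_pend (l : List Char) : pvScan l = pvPend [] l := by
  cases l with
  | nil => simp [pvScan, pvPend, pvChunks]
  | cons c rest =>
    by_cases hb : pvBit c = true
    · have h0 : ¬ c = '\n' := by rintro rfl; simp [pvBit] at hb
      have h1 : ¬ c = ' ' := by rintro rfl; simp [pvBit] at hb
      rw [pvScan]
      simp [h0, h1, pvPend, List.takeWhile_cons, List.dropWhile_cons, hb]
    · simp only [Bool.not_eq_true] at hb
      simp [pvPend, List.takeWhile_cons, List.dropWhile_cons, hb, pvChunks]

-- main loop invariant: A's fold from (toks, cur) on filtered input computes toks ++ pvPend cur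
theorem pvMain (l : List Char) (hl : ∀ c ∈ l, pvKeep c = true) (toks : List String)
    (cur : List Char) (hcur : cur.length < 8) :
    pvFinish (l.foldl pvAStep (toks, cur)) = toks ++ pvPend cur l := by
  induction l generalizing toks cur with
  | nil =>
    simp only [List.foldl_nil, pvFinish, pvPend, List.takeWhile_nil, List.dropWhile_nil, pvScan]
    simp only [List.append_nil]
    rw [pvChunks_small _ hcur]
    by_cases h : cur = [] <;> simp [h]
  | cons c rest ih =>
    have hkeep : pvKeep c = true := hl c (by simp)
    have hrest : ∀ x ∈ rest, pvKeep x = true := fun x hx => hl x (by simp [hx])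
    by_cases hb : pvBit c = true
    · have hb' : c = '0' ∨ c = '1' := by
        simpa [pvBit, decide_eq_true_iff] using hb
      have hcc : cur ++ (c :: List.takeWhile pvBit rest)
          = (cur ++ [c]) ++ List.takeWhile pvBit rest := by simp
      by_cases h8 : (cur ++ [c]).length = 8
      · rw [List.foldl_cons,
          show pvAStep (toks, cur) c = (toks ++ [String.mk (cur ++ [c])], []) from by
            simp [pvAStep, hb', h8],
          ih hrest _ [] (by norm_num)]
        simp only [pvPend, List.takeWhile_cons, List.dropWhile_cons, hb, if_true, List.nil_append]
        rw [hcc, pvChunks_full _ _ h8]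
        simp
      · rw [List.foldl_cons,
          show pvAStep (toks, cur) c = (toks, cur ++ [c]) from by
            simp only [List.length_append, List.length_cons, List.length_nil] at h8
            simp [pvAStep, hb']
            omega,
          ih hrest _ (cur ++ [c]) (by simp at h8 ⊢; omega)]
        simp only [pvPend, List.takeWhile_cons, List.dropWhile_cons, hb, if_true, List.nil_append]
        rw [hcc]
    · have hbf : pvBit c = false := by simpa using hb
      have hsep : c = ' ' ∨ c = '\n' := by
        simp [pvKeep, hbf, decide_eq_true_iff] at hkeep
        exact hkeep
      have hnb : ¬ (c = '0' ∨ c = '1') := by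
        rintro (rfl | rfl) <;> simp [pvBit] at hbf
      rcases hsep with rfl | rfl
      · -- space
        rw [List.foldl_cons,
          show pvAStep (toks, cur) ' '
              = ((if cur ≠ [] then toks ++ [String.mk cur] else toks), []) from by
            simp [pvAStep, hnb],
          ih hrest _ [] (by norm_num), ← pvScan_eq_pend]
        have hR : pvPend cur (' ' :: rest) = pvChunks cur ++ pvScan rest := by
          rw [pvPend, List.takeWhile_cons, List.dropWhile_cons]
          simp only [hbf, Bool.false_eq_true, if_false, ite_false, List.append_nil]
          rw [pvScan]
          simp
        rw [hR, pvChunks_small _ hcur]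
        by_cases h : cur = [] <;> simp [h]
      · -- newline
        rw [List.foldl_cons,
          show pvAStep (toks, cur) '\n'
              = ((if cur ≠ [] then toks ++ [String.mk cur] else toks) ++ ["00001010"], []) from by
            simp [pvAStep, hnb],
          ih hrest _ [] (by norm_num), ← pvScan_eq_pend]
        have hR : pvPend cur ('\n' :: rest) = pvChunks cur ++ "00001010" :: pvScan rest := by
          rw [pvPend, List.takeWhile_cons, List.dropWhile_cons]
          simp only [hbf, Bool.false_eq_true, if_false, ite_false, List.append_nil]
          rw [pvScan]
          simp
        rw [hR, pvChunks_small _ hcur]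
        by_cases h : cur = [] <;> simp [h]

-- ===== VERDICT (by name: the statement is the Claim_ definition above) =====
theorem tokenize_binary_py_spec : Claim_equal_tokenize_binary_py := by
  intro s _
  unfold Spec_tokenize_binary_py tokenize_binary_py tokenize_binary_py_alt
  rw [pvFold_filter]
  have := pvMain (s.toList.filter pvKeep) (fun c hc => (List.mem_filter.mp hc).2) [] [] (by norm_num)
  rw [pvScan_eq_pend]
  simpa [pvFinish] using this
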